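-- pv_equiv track=rewrite | github.com/yangyuwen-bri/research-skills-market | geoffrey-main/skills/strategic-planning-manager/scripts/process_transcripts.py | categorize_themes
-- ===== SOURCE A (Python) =====
-- def categorize_themes(themes: dict) -> dict:
--     """Categorize themes into K-12 strategic planning categories."""
--     categories = {
--         "student_achievement": [],
--         "equity_access": [],
--         "staff_quality": [],
--         "community_engagement": [],
--         "technology": [],
--         "facilities_resources": [],
--         "safety_wellness": [],
--         "fiscal": [],
--         "other": []
--     }
--
--     # Mapping of keywords to categories
--     category_keywords = {
--         "student_achievement": ["student", "learning", "achievement", "success", "academic", "curriculum", "instruction", "assessment", "grade", "test", "score"],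
--         "equity_access": ["equity", "access", "inclusive", "gap", "diversity", "equal", "fair", "opportunity", "underserved"],
--         "staff_quality": ["teacher", "staff", "professional", "development", "training", "retention", "hiring", "support"],
--         "community_engagement": ["parent", "family", "community", "engagement", "communication", "partnership", "involvement"],
--         "technology": ["technology", "digital", "device", "online", "computer", "software", "internet", "tech"],
--         "facilities_resources": ["facility", "building", "space", "resource", "material", "equipment", "infrastructure"],
--         "safety_wellness": ["safety", "security", "wellness", "mental", "health", "social", "emotional", "climate", "culture"],
--         "fiscal": ["budget", "funding", "fiscal", "financial", "cost", "money", "resource"]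
--     }
--
--     top_words = themes.get("top_words", [])
--
--     for word in top_words:
--         categorized = False
--         for category, keywords in category_keywords.items():
--             if any(kw in word for kw in keywords):
--                 categories[category].append(word)
--                 categorized = True
--                 break
--         if not categorized:
--             categories["other"].append(word)
--
--     # Remove empty categories
--     return {k: v for k, v in categories.items() if v}
-- ===== SOURCE B (Python) =====
-- def categorize_themes(themes: dict) -> dict:
--     """Categorize themes into K-12 strategic planning categories."""
--     category_keywords = [
--         ("student_achievement", ["student", "learning", "achievement", "success", "academic", "curriculum", "instruction", "assessment", "grade", "test", "score"]),
--         ("equity_access", ["equity", "access", "inclusive", "gap", "diversity", "equal", "fair", "opportunity", "underserved"]),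
--         ("staff_quality", ["teacher", "staff", "professional", "development", "training", "retention", "hiring", "support"]),
--         ("community_engagement", ["parent", "family", "community", "engagement", "communication", "partnership", "involvement"]),
--         ("technology", ["technology", "digital", "device", "online", "computer", "software", "internet", "tech"]),
--         ("facilities_resources", ["facility", "building", "space", "resource", "material", "equipment", "infrastructure"]),
--         ("safety_wellness", ["safety", "security", "wellness", "mental", "health", "social", "emotional", "climate", "culture"]),
--         ("fiscal", ["budget", "funding", "fiscal", "financial", "cost", "money", "resource"]),
--     ]
--     words = themes.get("top_words", [])
--     assigned = set()
--     result = {}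
--     for category, keywords in category_keywords:
--         bucket = [w for w in words if w not in assigned and any(kw in w for kw in keywords)]
--         if bucket:
--             result[category] = bucket
--         assigned.update(bucket)
--     other = [w for w in words if w not in assigned]
--     if other:
--         result["other"] = other
--     return result
-- ===== Notes on version B (the rewrite author's own statement) =====
-- stated objective: alternative
-- what changed: Instead of A's word-outer loop that finds each word's first matching category with a break and appends into a pre-built 9-key dict, B loops over the categories in their fixed order, collecting for each the not-yet-assigned words in one pass and maintaining a set of assigned words, then gathers the leftovers as 'other'; the result dict is built only from non-empty buckets.
import Mathlib
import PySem

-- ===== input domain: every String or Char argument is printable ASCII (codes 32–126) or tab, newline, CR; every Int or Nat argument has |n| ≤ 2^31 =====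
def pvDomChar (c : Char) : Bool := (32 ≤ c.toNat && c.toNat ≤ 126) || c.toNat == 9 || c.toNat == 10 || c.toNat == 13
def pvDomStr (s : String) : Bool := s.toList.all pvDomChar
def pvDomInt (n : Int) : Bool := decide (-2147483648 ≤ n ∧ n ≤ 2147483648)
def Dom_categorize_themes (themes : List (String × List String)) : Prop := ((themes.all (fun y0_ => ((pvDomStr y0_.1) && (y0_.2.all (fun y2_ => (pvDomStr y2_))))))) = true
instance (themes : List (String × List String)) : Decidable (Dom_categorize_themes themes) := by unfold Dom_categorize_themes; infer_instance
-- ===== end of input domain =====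

-- B loops over the fixed categories (outer) instead of A's word-outer first-match-with-break loop,
-- collecting each category's still-unassigned matching words in one pass over the words and keeping a
-- set of assigned words; same exact result, same asymptotic cost (objective: alternative decomposition).

-- ===== PORT A =====
-- shared keyword table (A's dict literal iterated via .items() = this pair list; B's list literal)
def pvKW : List (String × List String) := [
  ("student_achievement", ["student", "learning", "achievement", "success", "academic", "curriculum", "instruction", "assessment", "grade", "test", "score"]),
  ("equity_access", ["equity", "access", "inclusive", "gap", "diversity", "equal", "fair", "opportunity", "underserved"]),
  ("staff_quality", ["teacher", "staff", "professional", "development", "training", "retention", "hiring", "support"]),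
  ("community_engagement", ["parent", "family", "community", "engagement", "communication", "partnership", "involvement"]),
  ("technology", ["technology", "digital", "device", "online", "computer", "software", "internet", "tech"]),
  ("facilities_resources", ["facility", "building", "space", "resource", "material", "equipment", "infrastructure"]),
  ("safety_wellness", ["safety", "security", "wellness", "mental", "health", "social", "emotional", "climate", "culture"]),
  ("fiscal", ["budget", "funding", "fiscal", "financial", "cost", "money", "resource"])]

-- any(kw in word for kw in keywords)
def pvMatches (kws : List String) (w : String) : Bool := kws.any (fun kw => PySem.Str.isIn kw w)

-- A's inner 'for category, keywords in …: if any(…): append; break' + categorized flag = first match via find?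
def pvStepA (cats : PySem.Dict String (List String)) (word : String) : PySem.Dict String (List String) :=
  match pvKW.find? (fun p => pvMatches p.2 word) with
  | some p => cats.modify p.1 [] (fun l => l ++ [word])
  | none   => cats.modify "other" [] (fun l => l ++ [word])

def categorize_themes (themes : List (String × List String)) : List (String × List String) :=
  let categories : PySem.Dict String (List String) := PySem.Dict.mk
    [("student_achievement", []), ("equity_access", []), ("staff_quality", []),
     ("community_engagement", []), ("technology", []), ("facilities_resources", []),
     ("safety_wellness", []), ("fiscal", []), ("other", [])]
  let top_words := (PySem.Dict.mk themes).getD "top_words" []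
  let final := top_words.foldl pvStepA categories
  -- {k: v for k, v in categories.items() if v} over a dict with unique keys = filter of its items
  final.items.filter (fun kv => !kv.2.isEmpty)


-- ===== PORT B =====
-- loop body of B's 'for category, keywords in category_keywords'
def pvStepB (words : List String) (st : List String × PySem.Dict String (List String))
    (p : String × List String) : List String × PySem.Dict String (List String) :=
  let bucket := words.filter (fun w => !(PySem.Set.contains st.1 w) && pvMatches p.2 w)
  (PySem.Set.update st.1 bucket, if bucket.isEmpty then st.2 else st.2.insert p.1 bucket)

def categorize_themes_alt (themes : List (String × List String)) : List (String × List String) :=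
  let words := (PySem.Dict.mk themes).getD "top_words" []
  let st := pvKW.foldl (pvStepB words) (PySem.Set.empty, PySem.Dict.empty)
  let other := words.filter (fun w => !(PySem.Set.contains st.1 w))
  (if other.isEmpty then st.2 else st.2.insert "other" other).items


-- ===== PRECONDITION & SPEC =====
def Spec_categorize_themes (themes : List (String × List String)) (out : List (String × List String)) : Prop := out = categorize_themes_alt themes
instance (themes : List (String × List String)) (out : List (String × List String)) : Decidable (Spec_categorize_themes themes out) := by unfold Spec_categorize_themes; infer_instance

-- ===== CLAIM (what is proved, stated in full; the proofs are below) =====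
def Claim_equal_categorize_themes : Prop := ∀ (themes : List (String × List String)), Dom_categorize_themes themes → Spec_categorize_themes themes (categorize_themes themes)


-- ===== LEMMAS AND PROOFS =====

-- first-match predicate: no category in `done` matches w, and c does
def pvP (done : List (String × List String)) (c : String × List String) (w : String) : Bool :=
  !(done.any (fun q => pvMatches q.2 w)) && pvMatches c.2 w

def pvOther (ws : List String) : List String :=
  ws.filter (fun w => !(pvKW.any (fun q => pvMatches q.2 w)))

def pvEnt (name : String) (b : List String) : List (String × List String) :=
  if b.isEmpty then [] else [(name, b)]

def pvD (i : Nat) : List (String × List String) := pvKW.take i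
def pvC (i : Nat) : String × List String := (pvKW.drop i).headD ("", [])
def pvFi (ws : List String) (i : Nat) : List String := ws.filter (pvP (pvD i) (pvC i))

def pvBuck (ws : List String) : List (String × List String) → List (String × List String) → List (String × List String)
  | [], _ => []
  | c :: cs, done => pvEnt c.1 (ws.filter (pvP done c)) ++ pvBuck ws cs (done ++ [c])

def pvTarget (ws : List String) : List (String × List String) :=
  pvBuck ws pvKW [] ++ pvEnt "other" (pvOther ws)

lemma pvFilter_eq (l : List (String × List String)) :
    l.filter (fun kv => !kv.2.isEmpty) = l.flatMap (fun kv => pvEnt kv.1 kv.2) := by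
  induction l with
  | nil => rfl
  | cons kv l ih =>
    rw [List.filter_cons, List.flatMap_cons, ← ih, pvEnt]
    cases h : kv.2.isEmpty <;> simp_all

lemma pvAloop (ws : List String) : ∀ (v1 v2 v3 v4 v5 v6 v7 v8 v9 : List String),
    ws.foldl pvStepA (PySem.Dict.mk [("student_achievement", v1), ("equity_access", v2), ("staff_quality", v3), ("community_engagement", v4), ("technology", v5), ("facilities_resources", v6), ("safety_wellness", v7), ("fiscal", v8), ("other", v9)]) =
    PySem.Dict.mk [("student_achievement", v1 ++ pvFi ws 0), ("equity_access", v2 ++ pvFi ws 1), ("staff_quality", v3 ++ pvFi ws 2), ("community_engagement", v4 ++ pvFi ws 3), ("technology", v5 ++ pvFi ws 4), ("facilities_resources", v6 ++ pvFi ws 5), ("safety_wellness", v7 ++ pvFi ws 6), ("fiscal", v8 ++ pvFi ws 7), ("other", v9 ++ pvOther ws)] := by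
  induction ws with
  | nil => intro v1 v2 v3 v4 v5 v6 v7 v8 v9; simp [pvFi, pvOther]
  | cons w ws ih =>
    intro v1 v2 v3 v4 v5 v6 v7 v8 v9
    simp only [List.foldl_cons, pvStepA, pvKW, List.find?]
    cases h1 : pvMatches ["student", "learning", "achievement", "success", "academic", "curriculum", "instruction", "assessment", "grade", "test", "score"] w with
    | true =>
      simp [PySem.Dict.modify, PySem.Dict.insert, PySem.Dict.getD, PySem.Dict.get?, PySem.Dict.contains, ih, pvFi, pvD, pvC, pvP, pvOther, pvKW, List.append_assoc, h1]
    | false =>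
      cases h2 : pvMatches ["equity", "access", "inclusive", "gap", "diversity", "equal", "fair", "opportunity", "underserved"] w with
      | true =>
        simp [PySem.Dict.modify, PySem.Dict.insert, PySem.Dict.getD, PySem.Dict.get?, PySem.Dict.contains, ih, pvFi, pvD, pvC, pvP, pvOther, pvKW, List.append_assoc, h1, h2]
      | false =>
        cases h3 : pvMatches ["teacher", "staff", "professional", "development", "training", "retention", "hiring", "support"] w with
        | true =>
          simp [PySem.Dict.modify, PySem.Dict.insert, PySem.Dict.getD, PySem.Dict.get?, PySem.Dict.contains, ih, pvFi, pvD, pvC, pvP, pvOther, pvKW, List.append_assoc, h1, h2, h3]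
        | false =>
          cases h4 : pvMatches ["parent", "family", "community", "engagement", "communication", "partnership", "involvement"] w with
          | true =>
            simp [PySem.Dict.modify, PySem.Dict.insert, PySem.Dict.getD, PySem.Dict.get?, PySem.Dict.contains, ih, pvFi, pvD, pvC, pvP, pvOther, pvKW, List.append_assoc, h1, h2, h3, h4]
          | false =>
            cases h5 : pvMatches ["technology", "digital", "device", "online", "computer", "software", "internet", "tech"] w with
            | true =>
              simp [PySem.Dict.modify, PySem.Dict.insert, PySem.Dict.getD, PySem.Dict.get?, PySem.Dict.contains, ih, pvFi, pvD, pvC, pvP, pvOther, pvKW, List.append_assoc, h1, h2, h3, h4, h5]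
            | false =>
              cases h6 : pvMatches ["facility", "building", "space", "resource", "material", "equipment", "infrastructure"] w with
              | true =>
                simp [PySem.Dict.modify, PySem.Dict.insert, PySem.Dict.getD, PySem.Dict.get?, PySem.Dict.contains, ih, pvFi, pvD, pvC, pvP, pvOther, pvKW, List.append_assoc, h1, h2, h3, h4, h5, h6]
              | false =>
                cases h7 : pvMatches ["safety", "security", "wellness", "mental", "health", "social", "emotional", "climate", "culture"] w with
                | true =>
                  simp [PySem.Dict.modify, PySem.Dict.insert, PySem.Dict.getD, PySem.Dict.get?, PySem.Dict.contains, ih, pvFi, pvD, pvC, pvP, pvOther, pvKW, List.append_assoc, h1, h2, h3, h4, h5, h6, h7]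
                | false =>
                  cases h8 : pvMatches ["budget", "funding", "fiscal", "financial", "cost", "money", "resource"] w with
                  | true =>
                    simp [PySem.Dict.modify, PySem.Dict.insert, PySem.Dict.getD, PySem.Dict.get?, PySem.Dict.contains, ih, pvFi, pvD, pvC, pvP, pvOther, pvKW, List.append_assoc, h1, h2, h3, h4, h5, h6, h7, h8]
                  | false =>
                    simp [PySem.Dict.modify, PySem.Dict.insert, PySem.Dict.getD, PySem.Dict.get?, PySem.Dict.contains, ih, pvFi, pvD, pvC, pvP, pvOther, pvKW, List.append_assoc, h1, h2, h3, h4, h5, h6, h7, h8]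

lemma pvA_eq (ws : List String) :
    ((ws.foldl pvStepA (PySem.Dict.mk [("student_achievement", []), ("equity_access", []), ("staff_quality", []), ("community_engagement", []), ("technology", []), ("facilities_resources", []), ("safety_wellness", []), ("fiscal", []), ("other", [])])).items.filter (fun kv => !kv.2.isEmpty)) = pvTarget ws := by
  rw [pvAloop, pvFilter_eq]
  simp [pvTarget, pvBuck, pvKW, pvFi, pvD, pvC, List.append_assoc]

lemma pvBloop (ws : List String) : ∀ (cs done : List (String × List String))
    (a : List String) (res : PySem.Dict String (List String)),
    (∀ w ∈ ws, PySem.Set.contains a w = done.any (fun q => pvMatches q.2 w)) →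
    ((cs.map (·.1)) ++ ["other"]).Nodup →
    (∀ k ∈ (cs.map (·.1)) ++ ["other"], res.contains k = false) →
    ((cs.foldl (pvStepB ws) (a, res)).2.items = res.items ++ pvBuck ws cs done
     ∧ (∀ w ∈ ws, PySem.Set.contains (cs.foldl (pvStepB ws) (a, res)).1 w
          = (done ++ cs).any (fun q => pvMatches q.2 w))
     ∧ (cs.foldl (pvStepB ws) (a, res)).2.contains "other" = false) := by
  intro cs
  induction cs with
  | nil =>
    intro done a res hinv _ hres
    refine ⟨by simp [pvBuck], by simpa using hinv, hres "other" (by simp)⟩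
  | cons c cs ih =>
    intro done a res hinv hnodup hres
    have hbucket : ws.filter (fun w => !(PySem.Set.contains a w) && pvMatches c.2 w)
        = ws.filter (pvP done c) :=
      List.filter_congr (fun w hw => by rw [pvP, hinv w hw])
    have hmemb : ∀ w ∈ ws, (w ∈ ws.filter (pvP done c)) ↔ pvP done c w = true := by
      intro w hw; simp [List.mem_filter, hw]
    have hinv' : ∀ w ∈ ws,
        PySem.Set.contains (PySem.Set.update a (ws.filter (pvP done c))) w
          = (done ++ [c]).any (fun q => pvMatches q.2 w) := by
      intro w hw
      have h1 : PySem.Set.contains (PySem.Set.update a (ws.filter (pvP done c))) w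
          = (PySem.Set.contains a w || pvP done c w) := by
        rw [Bool.eq_iff_iff, PySem.Set.contains_iff, PySem.Set.mem_update, Bool.or_eq_true,
          PySem.Set.contains_iff, hmemb w hw]
      rw [h1, hinv w hw, pvP]
      cases hd : done.any (fun q => pvMatches q.2 w) <;> simp [hd]
    simp only [List.map_cons, List.cons_append, List.nodup_cons] at hnodup
    have hc1 : c.1 ∉ (cs.map (·.1)) ++ ["other"] := hnodup.1
    have hnodup' : ((cs.map (·.1)) ++ ["other"]).Nodup := hnodup.2
    have hmem' : ∀ k ∈ (cs.map (·.1)) ++ ["other"], k ∈ ((c :: cs).map (·.1)) ++ ["other"] := by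
      intro k hk
      simp only [List.map_cons, List.cons_append]
      exact List.mem_cons_of_mem _ hk
    simp only [List.foldl_cons, pvStepB]
    rw [hbucket]
    by_cases hbe : (ws.filter (pvP done c)).isEmpty
    · rw [if_pos hbe]
      obtain ⟨h1, h2, h3⟩ := ih (done ++ [c]) _ res hinv' hnodup' (fun k hk => hres k (hmem' k hk))
      refine ⟨?_, fun w hw => ?_, h3⟩
      · rw [h1]
        simp only [pvBuck]
        simp [pvEnt, hbe]
      · rw [h2 w hw]
        simp
    · rw [if_neg hbe]
      have hresc : res.contains c.1 = false := hres c.1 (by simp)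
      have hres' : ∀ k ∈ (cs.map (·.1)) ++ ["other"],
          (res.insert c.1 (ws.filter (pvP done c))).contains k = false := by
        intro k hk
        rw [PySem.Dict.contains_insert]
        have hkne : k ≠ c.1 := fun h => hc1 (h ▸ hk)
        simp [hkne, hres k (hmem' k hk)]
      obtain ⟨h1, h2, h3⟩ := ih (done ++ [c]) _ _ hinv' hnodup' hres'
      refine ⟨?_, fun w hw => ?_, h3⟩
      · rw [h1, PySem.Dict.items_insert_of_not_contains (h := hresc)]
        simp only [pvBuck]
        simp [pvEnt, hbe]
      · rw [h2 w hw]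
        simp

lemma pvB_eq (ws : List String) :
    (let st := pvKW.foldl (pvStepB ws) (PySem.Set.empty, PySem.Dict.empty)
     let other := ws.filter (fun w => !(PySem.Set.contains st.1 w))
     (if other.isEmpty then st.2 else st.2.insert "other" other).items) = pvTarget ws := by
  obtain ⟨hit, hinv, hoth⟩ := pvBloop ws pvKW [] PySem.Set.empty PySem.Dict.empty
    (by intro w _; rfl) (by decide) (by intro k _; rfl)
  have hfilter : ws.filter (fun w =>
        !(PySem.Set.contains ((pvKW.foldl (pvStepB ws) (PySem.Set.empty, PySem.Dict.empty)).1) w))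
      = pvOther ws :=
    List.filter_congr (fun w hw => by rw [hinv w hw]; rfl)
  simp only [hfilter]
  by_cases hbe : (pvOther ws).isEmpty
  · rw [if_pos hbe, hit, pvTarget]
    simp [pvEnt, hbe, PySem.Dict.empty]
  · rw [if_neg hbe, PySem.Dict.items_insert_of_not_contains (h := hoth), hit, pvTarget]
    simp [pvEnt, hbe, PySem.Dict.empty]

-- ===== VERDICT (by name: the statement is the Claim_ definition above) =====
theorem categorize_themes_spec : Claim_equal_categorize_themes := by
  intro themes _
  unfold Spec_categorize_themes categorize_themes categorize_themes_alt
  generalize (PySem.Dict.mk themes).getD "top_words" [] = ws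
  rw [pvA_eq ws]
  exact (pvB_eq ws).symm
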